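-- pv_equiv track=rewrite | github.com/panmpan17/HandMadeGame | utilites/make_font_atlas.py | simple_shelf_pack
-- ===== SOURCE A (Python) =====
-- def simple_shelf_pack(sizes, atlas_width, padding=1):
--     """
--     Simple shelf packer.
--     sizes: list of (w,h, id) tuples
--     returns dict id -> (x,y,w,h) and atlas_height
--     """
--     x = padding
--     y = padding
--     shelf_h = 0
--     placements = {}
--     for w,h,ident in sizes:
--         if x + w + padding > atlas_width:
--             # new shelf
--             y += shelf_h + padding
--             x = padding
--             shelf_h = 0
--         placements[ident] = (x, y, w, h)
--         x += w + padding
--         shelf_h = max(shelf_h, h)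
--     atlas_height = y + shelf_h + padding
--     return placements, atlas_height
-- ===== SOURCE B (Python) =====
-- def simple_shelf_pack(sizes, atlas_width, padding=1):
--     """
--     Two-pass shelf packer.
--     Pass 1 groups the glyphs into shelves (rows), each with its max height;
--     pass 2 walks the shelves with a running y and lays each row out from x=padding.
--     """
--     # pass 1: materialize the shelves
--     shelves = []
--     cur, cur_h, x = [], 0, padding
--     for w, h, ident in sizes:
--         if x + w + padding > atlas_width:
--             shelves.append((cur, cur_h))
--             cur, cur_h, x = [], 0, padding
--         cur.append((w, h, ident))
--         cur_h = max(cur_h, h)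
--         x += w + padding
--     shelves.append((cur, cur_h))
--     # pass 2: lay out each shelf left-to-right
--     placements = {}
--     y = padding
--     for glyphs, max_h in shelves:
--         x = padding
--         for w, h, ident in glyphs:
--             placements[ident] = (x, y, w, h)
--             x += w + padding
--         y += max_h + padding
--     return placements, y
-- ===== Notes on version B (the rewrite author's own statement) =====
-- stated objective: alternative
-- what changed: Replaces A's single fused loop over mutable (x,y,shelf_h) state by a two-pass algorithm: pass 1 materializes a list of shelves (glyph list + max height), pass 2 walks the shelves with a running y and lays each row out from x=padding.
import Mathlib
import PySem

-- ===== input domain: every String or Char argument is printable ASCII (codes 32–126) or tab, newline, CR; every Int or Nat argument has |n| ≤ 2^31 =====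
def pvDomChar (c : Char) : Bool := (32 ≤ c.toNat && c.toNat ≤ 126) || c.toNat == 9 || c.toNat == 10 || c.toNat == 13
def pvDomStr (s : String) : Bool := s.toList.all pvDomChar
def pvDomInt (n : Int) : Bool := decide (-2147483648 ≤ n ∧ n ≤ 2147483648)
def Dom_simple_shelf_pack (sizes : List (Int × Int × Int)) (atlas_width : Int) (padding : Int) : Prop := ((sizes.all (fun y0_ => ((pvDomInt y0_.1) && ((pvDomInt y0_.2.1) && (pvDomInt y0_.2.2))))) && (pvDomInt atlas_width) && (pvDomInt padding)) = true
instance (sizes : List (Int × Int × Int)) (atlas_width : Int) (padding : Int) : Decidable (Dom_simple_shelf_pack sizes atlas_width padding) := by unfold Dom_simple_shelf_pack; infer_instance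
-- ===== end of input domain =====

-- B replaces A's single fused loop by a two-pass algorithm (materialize shelves, then lay them out);
-- same result, same cost (objective: alternative). Both are total; no Pre_ needed.

-- ===== PORT A =====
-- A's for-loop over (x, y, shelf_h, placements); the branch resets (x, y, shelf_h), then the
-- common tail places the glyph and advances x / shelf_h.
def pvLoopA (atlas_width padding : Int) :
    List (Int × Int × Int) → Int × Int × Int × PySem.Dict Int (Int × Int × Int × Int) →
    Int × Int × Int × PySem.Dict Int (Int × Int × Int × Int)
  | [], st => st
  | (w, h, ident) :: rest, (x, y, shelf_h, placements) =>
    let (x, y, shelf_h) :=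
      if x + w + padding > atlas_width then (padding, y + shelf_h + padding, 0)
      else (x, y, shelf_h)
    pvLoopA atlas_width padding rest
      (x + w + padding, y, max shelf_h h, placements.insert ident (x, y, w, h))

def simple_shelf_pack (sizes : List (Int × Int × Int)) (atlas_width : Int) (padding : Int) : (List (Int × Int × Int × Int × Int)) × Int :=
  let st := pvLoopA atlas_width padding sizes (padding, padding, 0, PySem.Dict.empty)
  (st.2.2.2.items, st.2.1 + st.2.2.1 + padding)

-- ===== PORT B =====
-- pass 1: group the glyphs into shelves, each carrying its glyph list and running max height
def pvShelves (atlas_width padding : Int) :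
    List (Int × Int × Int) → List (Int × Int × Int) → Int → Int →
    List (List (Int × Int × Int) × Int)
  | [], cur, cur_h, _ => [(cur, cur_h)]
  | (w, h, ident) :: rest, cur, cur_h, x =>
    if x + w + padding > atlas_width then
      (cur, cur_h) :: pvShelves atlas_width padding rest [(w, h, ident)] (max 0 h) (padding + w + padding)
    else
      pvShelves atlas_width padding rest (cur ++ [(w, h, ident)]) (max cur_h h) (x + w + padding)

-- inner loop of pass 2: lay one shelf out left-to-right from a given x
def pvLayoutRow (padding : Int) :
    Int → Int → List (Int × Int × Int) → PySem.Dict Int (Int × Int × Int × Int) →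
    PySem.Dict Int (Int × Int × Int × Int)
  | _, _, [], d => d
  | x, y, (w, h, ident) :: rest, d =>
    pvLayoutRow padding (x + w + padding) y rest (d.insert ident (x, y, w, h))

-- outer loop of pass 2: walk the shelves with a running y
def pvPass2 (padding : Int) :
    List (List (Int × Int × Int) × Int) → Int → PySem.Dict Int (Int × Int × Int × Int) →
    PySem.Dict Int (Int × Int × Int × Int) × Int
  | [], y, d => (d, y)
  | (glyphs, max_h) :: rest, y, d =>
    pvPass2 padding rest (y + max_h + padding) (pvLayoutRow padding padding y glyphs d)

def simple_shelf_pack_alt (sizes : List (Int × Int × Int)) (atlas_width : Int) (padding : Int) : (List (Int × Int × Int × Int × Int)) × Int :=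
  let shelves := pvShelves atlas_width padding sizes [] 0 padding
  let (placements, y) := pvPass2 padding shelves padding PySem.Dict.empty
  (placements.items, y)

-- ===== PRECONDITION & SPEC =====
def Spec_simple_shelf_pack (sizes : List (Int × Int × Int)) (atlas_width : Int) (padding : Int) (out : (List (Int × Int × Int × Int × Int)) × Int) : Prop := out = simple_shelf_pack_alt sizes atlas_width padding
instance (sizes : List (Int × Int × Int)) (atlas_width : Int) (padding : Int) (out : (List (Int × Int × Int × Int × Int)) × Int) : Decidable (Spec_simple_shelf_pack sizes atlas_width padding out) := by unfold Spec_simple_shelf_pack; infer_instance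

-- ===== CLAIM (what is proved, stated in full; the proofs are below) =====
def Claim_equal_simple_shelf_pack : Prop := ∀ (sizes : List (Int × Int × Int)) (atlas_width : Int) (padding : Int), Dom_simple_shelf_pack sizes atlas_width padding → Spec_simple_shelf_pack sizes atlas_width padding (simple_shelf_pack sizes atlas_width padding)

-- ===== LEMMAS AND PROOFS =====

-- total advance contributed by a row of glyphs
def pvRowW (padding : Int) (cur : List (Int × Int × Int)) : Int :=
  (cur.map (fun g => g.1 + padding)).sum

theorem pvLayoutRow_append (padding x y : Int) (cur : List (Int × Int × Int))
    (w h ident : Int) (d : PySem.Dict Int (Int × Int × Int × Int)) :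
    pvLayoutRow padding x y (cur ++ [(w, h, ident)]) d =
      (pvLayoutRow padding x y cur d).insert ident (x + pvRowW padding cur, y, w, h) := by
  induction cur generalizing x d with
  | nil => simp [pvLayoutRow, pvRowW]
  | cons g rest ih =>
      obtain ⟨w', h', id'⟩ := g
      simp only [List.cons_append, pvLayoutRow, ih, pvRowW, List.map_cons, List.sum_cons]
      ring_nf

-- the key invariant: A's loop from a state whose current row is `cur` (already placed from
-- x = padding) computes exactly B's pass 2 applied to pass 1's shelves
theorem pvKey (atlas_width padding : Int) (sizes : List (Int × Int × Int)) :
    ∀ (y shelf_h : Int) (cur : List (Int × Int × Int)) (d : PySem.Dict Int (Int × Int × Int × Int)),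
    (let st := pvLoopA atlas_width padding sizes
        (padding + pvRowW padding cur, y, shelf_h, pvLayoutRow padding padding y cur d)
     (st.2.2.2, st.2.1 + st.2.2.1 + padding)) =
    pvPass2 padding (pvShelves atlas_width padding sizes cur shelf_h (padding + pvRowW padding cur)) y d := by
  induction sizes with
  | nil =>
      intro y shelf_h cur d
      simp [pvLoopA, pvShelves, pvPass2]
  | cons g rest ih =>
      intro y shelf_h cur d
      obtain ⟨w, h, ident⟩ := g
      by_cases hbr : padding + pvRowW padding cur + w + padding > atlas_width
      · simp only [pvLoopA, pvShelves, if_pos hbr, pvPass2]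
        have h1 : padding + w + padding = padding + pvRowW padding [(w, h, ident)] := by
          simp [pvRowW]; ring
        have h2 : (pvLayoutRow padding padding y cur d).insert ident
              (padding, y + shelf_h + padding, w, h) =
            pvLayoutRow padding padding (y + shelf_h + padding) [(w, h, ident)]
              (pvLayoutRow padding padding y cur d) := by
          simp [pvLayoutRow]
        rw [h2, h1]
        exact ih (y + shelf_h + padding) (max 0 h) [(w, h, ident)] (pvLayoutRow padding padding y cur d)
      · simp only [pvLoopA, pvShelves, if_neg hbr]
        have h1 : padding + pvRowW padding cur + w + padding =
            padding + pvRowW padding (cur ++ [(w, h, ident)]) := by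
          simp [pvRowW]; ring
        have h2 : (pvLayoutRow padding padding y cur d).insert ident
              (padding + pvRowW padding cur, y, w, h) =
            pvLayoutRow padding padding y (cur ++ [(w, h, ident)]) d := by
          rw [pvLayoutRow_append]
        rw [h2, h1]
        exact ih y (max shelf_h h) (cur ++ [(w, h, ident)]) d

-- ===== VERDICT (by name: the statement is the Claim_ definition above) =====
theorem simple_shelf_pack_spec : Claim_equal_simple_shelf_pack := by
  intro sizes atlas_width padding _
  have h := pvKey atlas_width padding sizes padding 0 [] PySem.Dict.empty
  simp only [pvRowW, List.map_nil, List.sum_nil, add_zero, pvLayoutRow] at h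
  rcases hp : pvPass2 padding (pvShelves atlas_width padding sizes [] 0 padding) padding
      PySem.Dict.empty with ⟨pl, yv⟩
  rw [hp] at h
  have h1 := congrArg Prod.fst h
  have h2 := congrArg Prod.snd h
  simp only [] at h1 h2
  simp [Spec_simple_shelf_pack, simple_shelf_pack, simple_shelf_pack_alt, hp, h1, h2]
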